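-- pv_equiv track=rewrite | github.com/Kristenwangqingran/venus_be | app/libs/exec_mgr.py | _check_mismatch
-- ===== SOURCE A (Python) =====
-- def _check_mismatch(dependency_case_sequence, case_sequence):
--     err = ''
--     cross_set = set(dependency_case_sequence) & set(case_sequence)
--     if cross_set:
--         dependency_order = dict([(dependency_case_sequence.index(item), item)
--                                  for item in cross_set])
--         dependency_sorted_key = sorted(dependency_order.keys())
--
--         sequence_order = dict([(case_sequence.index(item), item)
--                                for item in cross_set])
--         sequence_sorted_key = sorted(sequence_order.keys())
--
--         for index, _ in enumerate(dependency_sorted_key):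
--             if dependency_order[dependency_sorted_key[index]] != sequence_order[sequence_sorted_key[index]]:
--                 err += f"dependency_order{[dependency_order[k] for k in dependency_sorted_key]} != sequence_order{[sequence_order[k] for k in sequence_sorted_key]}\n"
--                 break
--     return err
-- ===== SOURCE B (Python) =====
-- def _check_mismatch(dependency_case_sequence, case_sequence):
--     dep_set = set(dependency_case_sequence)
--     case_set = set(case_sequence)
--     dependency_order = []
--     seen = set()
--     for item in dependency_case_sequence:
--         if item in case_set and item not in seen:
--             seen.add(item)
--             dependency_order.append(item)
--     sequence_order = []
--     seen = set()
--     for item in case_sequence: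
--         if item in dep_set and item not in seen:
--             seen.add(item)
--             sequence_order.append(item)
--     if dependency_order != sequence_order:
--         return f"dependency_order{dependency_order} != sequence_order{sequence_order}\n"
--     return ''
-- ===== Notes on version B (the rewrite author's own statement) =====
-- stated objective: faster
-- what changed: Replaces the per-common-element list.index scans, index-keyed dicts and key sorting with two single deduplicating passes (a seen-set) that collect the common elements directly in first-occurrence order, then one list comparison.
import Mathlib
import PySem

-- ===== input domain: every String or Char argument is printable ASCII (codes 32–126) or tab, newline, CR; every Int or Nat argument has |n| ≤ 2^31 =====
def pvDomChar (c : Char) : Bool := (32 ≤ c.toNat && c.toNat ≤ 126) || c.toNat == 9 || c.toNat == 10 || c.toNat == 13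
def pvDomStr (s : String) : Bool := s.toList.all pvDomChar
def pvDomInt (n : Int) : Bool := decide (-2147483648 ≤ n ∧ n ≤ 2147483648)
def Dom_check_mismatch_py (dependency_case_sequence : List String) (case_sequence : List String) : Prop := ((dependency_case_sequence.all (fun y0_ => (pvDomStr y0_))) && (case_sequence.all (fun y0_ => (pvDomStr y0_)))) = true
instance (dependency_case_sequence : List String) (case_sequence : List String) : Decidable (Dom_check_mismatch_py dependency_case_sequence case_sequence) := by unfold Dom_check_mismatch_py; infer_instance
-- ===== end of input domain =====

-- B replaces A's per-element list.index scans, index-keyed dicts and key sorting by two single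
-- deduplicating passes collecting the common elements in first-occurrence order (objective: faster).


-- ===== shared formatting helpers (both Pythons render the identical f-string message) =====
-- repr of a str, exact on the domain (printable ASCII plus tab/newline/CR): quote is ' unless the
-- string contains ' and no "; backslash, the quote char and \t \n \r are escaped.
def pyReprStr (s : String) : String :=
  let cs := s.toList
  let q : Char := if cs.contains '\'' && !(cs.contains '"') then '"' else '\''
  let esc := cs.flatMap (fun c =>
    if c = '\\' then ['\\', '\\']
    else if c = q then ['\\', q]
    else if c = '\t' then ['\\', 't']
    else if c = '\n' then ['\\', 'n']
    else if c = '\r' then ['\\', 'r']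
    else [c])
  String.ofList (q :: (esc ++ [q]))

def pyReprList (xs : List String) : String :=
  "[" ++ PySem.Str.join ", " (xs.map pyReprStr) ++ "]"

def pyMismatchMsg (d s : List String) : String :=
  "dependency_order" ++ pyReprList d ++ " != sequence_order" ++ pyReprList s ++ "\n"

-- ===== PORT A =====
-- xs.index(item); in A it is only applied to members of xs, so Python never raises and the
-- .getD 0 default is never used.
def pyIndexInt (xs : List String) (x : String) : Int :=
  ((PySem.List.index? xs x).getD 0 : Nat)

-- the 'for index, _ in enumerate(dependency_sorted_key): … break' loop of A; i is the running index.
-- dict lookups dependency_order[k] are at keys present in the dict, so KeyError is impossible and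
-- getD's "" default is never used; dsk[index]/ssk[index] are in range (equal lengths), pyGetD's 0 likewise.
def checkLoopA (remaining : List Int) (i : Nat) (dOrd sOrd : PySem.Dict Int String)
    (dsk ssk : List Int) : String :=
  match remaining with
  | [] => ""
  | _ :: rest =>
    if dOrd.getD (PySem.List.pyGetD dsk (i : Int) 0) "" ≠ sOrd.getD (PySem.List.pyGetD ssk (i : Int) 0) "" then
      pyMismatchMsg (dsk.map (fun k => dOrd.getD k "")) (ssk.map (fun k => sOrd.getD k ""))
    else checkLoopA rest (i + 1) dOrd sOrd dsk ssk

-- the Python builds the two dicts by iterating the SET cross_set (hash order); their contents, keys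
-- (consumed sorted) and lookups are order-independent, so iterating cross in its stored order is exact.
def check_mismatch_py (dependency_case_sequence : List String) (case_sequence : List String) : String :=
  let err := ""
  let cross := PySem.Set.inter (PySem.Set.ofList dependency_case_sequence) (PySem.Set.ofList case_sequence)
  if cross = [] then err
  else
    let dOrd := PySem.Dict.ofList (cross.map (fun item => (pyIndexInt dependency_case_sequence item, item)))
    let dsk := PySem.List.sorted dOrd.keys (fun k => k)
    let sOrd := PySem.Dict.ofList (cross.map (fun item => (pyIndexInt case_sequence item, item)))
    let ssk := PySem.List.sorted sOrd.keys (fun k => k)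
    checkLoopA dsk 0 dOrd sOrd dsk ssk

-- ===== PORT B =====
-- one deduplicating pass of Source B: collect items of xs that are in `other` and not yet seen.
def bCollect (xs : List String) (other : PySem.Set String) : PySem.Set String × List String :=
  xs.foldl
    (fun st item =>
      if other.contains item && !(st.1.contains item) then (st.1.add item, st.2 ++ [item]) else st)
    (PySem.Set.empty, [])

def check_mismatch_py_alt (dependency_case_sequence : List String) (case_sequence : List String) : String :=
  let depSet := PySem.Set.ofList dependency_case_sequence
  let caseSet := PySem.Set.ofList case_sequence
  let dependencyOrder := (bCollect dependency_case_sequence caseSet).2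
  let sequenceOrder := (bCollect case_sequence depSet).2
  if dependencyOrder ≠ sequenceOrder then pyMismatchMsg dependencyOrder sequenceOrder
  else ""

-- ===== PRECONDITION & SPEC =====
def Spec_check_mismatch_py (dependency_case_sequence : List String) (case_sequence : List String) (out : String) : Prop := out = check_mismatch_py_alt dependency_case_sequence case_sequence
instance (dependency_case_sequence : List String) (case_sequence : List String) (out : String) : Decidable (Spec_check_mismatch_py dependency_case_sequence case_sequence out) := by unfold Spec_check_mismatch_py; infer_instance

-- ===== CLAIM (what is proved, stated in full; the proofs are below) =====
def Claim_equal_check_mismatch_py : Prop := ∀ (dependency_case_sequence : List String) (case_sequence : List String), Dom_check_mismatch_py dependency_case_sequence case_sequence → Spec_check_mismatch_py dependency_case_sequence case_sequence (check_mismatch_py dependency_case_sequence case_sequence)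

-- ===== LEMMAS AND PROOFS =====

-- abbreviations for the two first-occurrence-ordered common-element lists
def crossOf (dep cs : List String) : List String :=
  PySem.Set.inter (PySem.Set.ofList dep) (PySem.Set.ofList cs)

def cross2Of (dep cs : List String) : List String :=
  List.filter (fun x => PySem.Set.contains (PySem.Set.ofList dep) x) (PySem.Set.ofList cs)

theorem mem_crossOf (dep cs : List String) (x : String) :
    x ∈ crossOf dep cs ↔ x ∈ dep ∧ x ∈ cs := by
  simp [crossOf, PySem.Set.inter, List.mem_filter, PySem.Set.mem_ofList]

theorem mem_cross2Of (dep cs : List String) (x : String) :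
    x ∈ cross2Of dep cs ↔ x ∈ dep ∧ x ∈ cs := by
  simp [cross2Of, List.mem_filter, PySem.Set.mem_ofList, and_comm]

theorem nodup_crossOf (dep cs : List String) : (crossOf dep cs).Nodup :=
  (PySem.Set.nodup_ofList dep).filter _

theorem nodup_cross2Of (dep cs : List String) : (cross2Of dep cs).Nodup :=
  (PySem.Set.nodup_ofList cs).filter _

theorem crossOf_perm (dep cs : List String) : (crossOf dep cs).Perm (cross2Of dep cs) :=
  (List.perm_ext_iff_of_nodup (nodup_crossOf dep cs) (nodup_cross2Of dep cs)).mpr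
    (fun x => by rw [mem_crossOf, mem_cross2Of])

-- B's deduplicating pass, characterised: with the two state components equal it appends the
-- not-yet-present filtered elements, i.e. computes Set.update.
theorem bCollect_go (other : PySem.Set String) (xs : List String) :
    ∀ a : PySem.Set String,
      (xs.foldl
        (fun st item =>
          if other.contains item && !(st.1.contains item) then (st.1.add item, st.2 ++ [item]) else st)
        (a, a)).2
      = PySem.Set.update a (xs.filter (fun x => other.contains x)) := by
  induction xs with
  | nil => intro a; simp [PySem.Set.update_nil]
  | cons x xs ih =>
    intro a
    rw [List.foldl_cons, List.filter_cons]
    by_cases hc : other.contains x = true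
    · by_cases hm : a.contains x = true
      · have hcond : (other.contains x && !a.contains x) = false := by rw [hm]; simp
        rw [if_neg (by rw [hcond]; simp), if_pos hc, PySem.Set.update_cons,
          PySem.Set.add_of_mem ((PySem.Set.contains_iff a x).mp hm), ih]
      · have hx : x ∉ a := fun h => hm ((PySem.Set.contains_iff a x).mpr h)
        have hadd : a.add x = a ++ [x] := PySem.Set.add_of_not_mem hx
        have hm' : a.contains x = false := Bool.eq_false_iff.mpr hm
        have hcond : (other.contains x && !a.contains x) = true := by rw [hc, hm']; rfl
        rw [if_pos hcond, if_pos hc, PySem.Set.update_cons]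
        have h2 := ih (a.add x)
        rw [hadd] at h2 ⊢
        exact h2
    · have hc' : other.contains x = false := Bool.eq_false_iff.mpr hc
      have hcond : (other.contains x && !a.contains x) = false := by rw [hc']; rfl
      rw [if_neg (by rw [hcond]; simp), if_neg hc, ih]

theorem bCollect_snd (xs : List String) (other : PySem.Set String) :
    (bCollect xs other).2 = PySem.Set.ofList (xs.filter (fun x => other.contains x)) := by
  unfold bCollect
  have h := bCollect_go other xs PySem.Set.empty
  rw [PySem.Set.update_empty] at h
  simpa [PySem.Set.empty] using h

-- dedup commutes with filter: first occurrences of the filtered list are the filtered first occurrences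
theorem ofList_filter (p : String → Bool) (xs : List String) :
    PySem.Set.ofList (xs.filter p) = List.filter p (PySem.Set.ofList xs) := by
  induction xs with
  | nil => simp [PySem.Set.ofList_nil]
  | cons x xs ih =>
    by_cases hp : p x = true
    · rw [List.filter_cons_of_pos hp, PySem.Set.ofList_cons, PySem.Set.ofList_cons,
        List.filter_cons_of_pos hp, ih]
      simp only [PySem.Set.discard, List.filter_filter]
      rw [List.filter_congr (fun y _ => Bool.and_comm _ _)]
    · rw [List.filter_cons_of_neg hp, PySem.Set.ofList_cons, List.filter_cons_of_neg hp, ih]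
      simp only [PySem.Set.discard, List.filter_filter]
      refine (List.filter_congr (fun y _ => ?_)).symm
      by_cases hyx : y = x
      · subst hyx; simp [hp]
      · simp [hyx]

-- index facts
theorem pyIndexInt_nonneg (xs : List String) (x : String) : 0 ≤ pyIndexInt xs x :=
  Int.natCast_nonneg _

theorem pyIndexInt_cons_self (x : String) (xs : List String) : pyIndexInt (x :: xs) x = 0 := by
  simp [pyIndexInt, PySem.List.index?, List.idxOf?_cons]

theorem pyIndexInt_cons_of_ne {y x : String} (xs : List String) (h : y ≠ x) (hy : y ∈ xs) :
    pyIndexInt (x :: xs) y = pyIndexInt xs y + 1 := by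
  obtain ⟨n, hn⟩ := Option.isSome_iff_exists.mp (List.isSome_idxOf?.mpr hy)
  have hne : (x == y) = false := by simp [Ne.symm h]
  simp [pyIndexInt, PySem.List.index?, List.idxOf?_cons, hne, hn]

-- along the first-occurrence order, first indices strictly increase
theorem pyIndexInt_pairwise (xs : List String) :
    (PySem.Set.ofList xs).Pairwise (fun a b => pyIndexInt xs a < pyIndexInt xs b) := by
  induction xs with
  | nil => simp [PySem.Set.ofList_nil]
  | cons x xs ih =>
    rw [PySem.Set.ofList_cons, List.pairwise_cons]
    constructor
    · intro b hb
      obtain ⟨hbs, hbx⟩ := (PySem.Set.mem_discard _ _ _).mp hb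
      have hbxs : b ∈ xs := (PySem.Set.mem_ofList _ _).mp hbs
      rw [pyIndexInt_cons_self, pyIndexInt_cons_of_ne xs hbx hbxs]
      have := pyIndexInt_nonneg xs b
      omega
    · have hfilt : ((PySem.Set.ofList xs).discard x).Pairwise
          (fun a b => pyIndexInt xs a < pyIndexInt xs b) := ih.filter _
      refine hfilt.imp_of_mem (fun {a b} ha hb hab => ?_)
      obtain ⟨has, hax⟩ := (PySem.Set.mem_discard _ _ _).mp ha
      obtain ⟨hbs, hbx⟩ := (PySem.Set.mem_discard _ _ _).mp hb
      rw [pyIndexInt_cons_of_ne xs hax ((PySem.Set.mem_ofList _ _).mp has),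
        pyIndexInt_cons_of_ne xs hbx ((PySem.Set.mem_ofList _ _).mp hbs)]
      omega

theorem crossOf_pairwise (dep cs : List String) :
    (crossOf dep cs).Pairwise (fun a b => pyIndexInt dep a < pyIndexInt dep b) :=
  (pyIndexInt_pairwise dep).filter _

theorem cross2Of_pairwise (dep cs : List String) :
    (cross2Of dep cs).Pairwise (fun a b => pyIndexInt cs a < pyIndexInt cs b) :=
  (pyIndexInt_pairwise cs).filter _

-- the dict built from (key item, item) pairs with distinct keys has exactly those items
theorem dict_items_of_nodup_keys (l : List String) (k : String → Int)
    (hk : (l.map k).Nodup) :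
    (PySem.Dict.ofList (l.map (fun it => (k it, it)))).items = l.map (fun it => (k it, it)) := by
  show (List.foldl (fun acc p => acc.insert p.1 p.2) PySem.Dict.empty (l.map (fun it => (k it, it)))).items = _
  rw [List.foldl_map]
  have h := PySem.Dict.items_foldl_insert_fresh l k (fun it => it) PySem.Dict.empty
    (fun a _ => PySem.Dict.contains_empty _) hk
  simpa using h

theorem dict_getD_of_mem (l : List String) (k : String → Int) (hk : (l.map k).Nodup)
    {it : String} (hit : it ∈ l) :
    (PySem.Dict.ofList (l.map (fun x => (k x, x)))).getD (k it) "" = it := by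
  apply PySem.Dict.getD_of_mem_items
  · rw [dict_items_of_nodup_keys l k hk]
    exact List.mem_map_of_mem hit
  · show ((PySem.Dict.ofList (l.map (fun x => (k x, x)))).items.map Prod.fst).Nodup
    rw [dict_items_of_nodup_keys l k hk, List.map_map]
    simpa using hk

theorem dict_keys_eq (l : List String) (k : String → Int) (hk : (l.map k).Nodup) :
    (PySem.Dict.ofList (l.map (fun x => (k x, x)))).keys = l.map k := by
  show ((PySem.Dict.ofList (l.map (fun x => (k x, x)))).items.map Prod.fst) = _
  rw [dict_items_of_nodup_keys l k hk, List.map_map]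
  rfl

-- A's mismatch-scan loop: with equal-length key lists it tests positionwise equality of the two
-- looked-up value lists and returns the message on the first difference.
theorem checkLoopA_spec (dOrd sOrd : PySem.Dict Int String) (dsk ssk : List Int)
    (hlen : ssk.length = dsk.length) :
    ∀ (r : List Int) (i : Nat), r = dsk.drop i →
      checkLoopA r i dOrd sOrd dsk ssk =
        if (dsk.drop i).map (fun k => dOrd.getD k "") = (ssk.drop i).map (fun k => sOrd.getD k "")
        then ""
        else pyMismatchMsg (dsk.map (fun k => dOrd.getD k "")) (ssk.map (fun k => sOrd.getD k "")) := by
  intro r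
  induction r with
  | nil =>
    intro i h
    have hd : dsk.length ≤ i := List.drop_eq_nil_iff.mp h.symm
    have hs : ssk.length ≤ i := by omega
    rw [List.drop_eq_nil_iff.mpr hd, List.drop_eq_nil_iff.mpr hs]
    simp [checkLoopA]
  | cons a r ih =>
    intro i h
    have hi : i < dsk.length := by
      by_contra hle
      rw [List.drop_eq_nil_iff.mpr (by omega)] at h
      exact List.cons_ne_nil a r h
    have hi' : i < ssk.length := by omega
    have hd : dsk.drop i = dsk[i] :: dsk.drop (i + 1) := List.drop_eq_getElem_cons hi
    have hs : ssk.drop i = ssk[i] :: ssk.drop (i + 1) := List.drop_eq_getElem_cons hi'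
    have hgd : PySem.List.pyGetD dsk (i : Int) 0 = dsk[i] := by
      rw [PySem.List.pyGetD_natCast, List.getD_eq_getElem _ _ hi]
    have hgs : PySem.List.pyGetD ssk (i : Int) 0 = ssk[i] := by
      rw [PySem.List.pyGetD_natCast, List.getD_eq_getElem _ _ hi']
    show (if dOrd.getD (PySem.List.pyGetD dsk (i : Int) 0) "" ≠ sOrd.getD (PySem.List.pyGetD ssk (i : Int) 0) ""
        then pyMismatchMsg (dsk.map (fun k => dOrd.getD k "")) (ssk.map (fun k => sOrd.getD k ""))
        else checkLoopA r (i + 1) dOrd sOrd dsk ssk) = _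
    rw [hgd, hgs, hd, hs, List.map_cons, List.map_cons]
    by_cases hc : dOrd.getD dsk[i] "" = sOrd.getD ssk[i] ""
    · rw [if_neg (by simpa using hc)]
      have hr : r = dsk.drop (i + 1) := by
        rw [hd] at h; exact ((List.cons.injEq _ _ _ _).mp h).2
      rw [ih (i + 1) hr]
      by_cases ht : (dsk.drop (i + 1)).map (fun k => dOrd.getD k "")
          = (ssk.drop (i + 1)).map (fun k => sOrd.getD k "")
      · rw [if_pos ht, if_pos (by rw [hc, ht])]
      · rw [if_neg ht, if_neg (by simp only [List.cons.injEq, not_and]; exact fun _ => ht)]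
    · rw [if_pos (by simpa using hc), if_neg (by simp [hc])]

-- ===== VERDICT (by name: the statement is the Claim_ definition above) =====
theorem check_mismatch_py_spec : Claim_equal_check_mismatch_py := by
  intro dep cs _
  unfold Spec_check_mismatch_py
  have hB1 : (bCollect dep (PySem.Set.ofList cs)).2 = crossOf dep cs := by
    rw [bCollect_snd, ofList_filter]; rfl
  have hB2 : (bCollect cs (PySem.Set.ofList dep)).2 = cross2Of dep cs := by
    rw [bCollect_snd, ofList_filter]; rfl
  simp only [check_mismatch_py, check_mismatch_py_alt, hB1, hB2]
  rw [show PySem.Set.inter (PySem.Set.ofList dep) (PySem.Set.ofList cs) = crossOf dep cs from rfl]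
  by_cases h0 : crossOf dep cs = []
  · have h2 : cross2Of dep cs = [] := by
      rw [List.eq_nil_iff_forall_not_mem] at h0 ⊢
      intro x hx
      exact h0 x ((mem_crossOf dep cs x).mpr ((mem_cross2Of dep cs x).mp hx))
    rw [if_pos h0, h0, h2]
    simp
  · rw [if_neg h0]
    have hkdN : ((crossOf dep cs).map (fun it => pyIndexInt dep it)).Nodup :=
      (List.pairwise_map.mpr (crossOf_pairwise dep cs)).imp (fun h => Int.ne_of_lt h)
    have hks2N : ((cross2Of dep cs).map (fun it => pyIndexInt cs it)).Nodup :=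
      (List.pairwise_map.mpr (cross2Of_pairwise dep cs)).imp (fun h => Int.ne_of_lt h)
    have hpermKs : ((crossOf dep cs).map (fun it => pyIndexInt cs it)).Perm
        ((cross2Of dep cs).map (fun it => pyIndexInt cs it)) :=
      (crossOf_perm dep cs).map _
    have hksN : ((crossOf dep cs).map (fun it => pyIndexInt cs it)).Nodup :=
      hpermKs.nodup_iff.mpr hks2N
    rw [dict_keys_eq (crossOf dep cs) (fun it => pyIndexInt dep it) hkdN,
      dict_keys_eq (crossOf dep cs) (fun it => pyIndexInt cs it) hksN]
    have hdsk : PySem.List.sorted ((crossOf dep cs).map (fun it => pyIndexInt dep it)) (fun k => k)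
        = (crossOf dep cs).map (fun it => pyIndexInt dep it) :=
      PySem.List.sorted_eq_of_perm_of_pairwise_lt _ _ _ (List.Perm.refl _)
        (List.pairwise_map.mpr (crossOf_pairwise dep cs))
    have hssk : PySem.List.sorted ((crossOf dep cs).map (fun it => pyIndexInt cs it)) (fun k => k)
        = (cross2Of dep cs).map (fun it => pyIndexInt cs it) :=
      PySem.List.sorted_eq_of_perm_of_pairwise_lt _ _ _ hpermKs.symm
        (List.pairwise_map.mpr (cross2Of_pairwise dep cs))
    rw [hdsk, hssk]
    have hlen : ((cross2Of dep cs).map (fun it => pyIndexInt cs it)).length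
        = ((crossOf dep cs).map (fun it => pyIndexInt dep it)).length := by
      simp [(crossOf_perm dep cs).length_eq]
    rw [checkLoopA_spec _ _ _ _ hlen _ 0 List.drop_zero.symm, List.drop_zero, List.drop_zero]
    have hmapD : ((crossOf dep cs).map (fun it => pyIndexInt dep it)).map
        (fun k => (PySem.Dict.ofList ((crossOf dep cs).map
          (fun item => (pyIndexInt dep item, item)))).getD k "") = crossOf dep cs := by
      rw [List.map_map]
      exact List.map_congr_left (fun it hit =>
        dict_getD_of_mem (crossOf dep cs) (fun x => pyIndexInt dep x) hkdN hit)
        |>.trans (List.map_id _)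
    have hmapS : ((cross2Of dep cs).map (fun it => pyIndexInt cs it)).map
        (fun k => (PySem.Dict.ofList ((crossOf dep cs).map
          (fun item => (pyIndexInt cs item, item)))).getD k "") = cross2Of dep cs := by
      rw [List.map_map]
      refine (List.map_congr_left (fun it hit => ?_)).trans (List.map_id _)
      have hitc : it ∈ crossOf dep cs :=
        (mem_crossOf dep cs it).mpr ((mem_cross2Of dep cs it).mp hit)
      exact dict_getD_of_mem (crossOf dep cs) (fun x => pyIndexInt cs x) hksN hitc
    rw [hmapD, hmapS]
    by_cases heq : crossOf dep cs = cross2Of dep cs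
    · rw [if_pos heq, if_neg (by simpa using heq)]
    · rw [if_neg heq, if_pos (by simpa using heq)]
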